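-- pv_equiv track=rewrite | github.com/caillef/craft-island | scripts/craft_grid.py | generate_craft_number
-- ===== SOURCE A (Python) =====
-- def generate_craft_number(craft_grid):
--     """Generate a number representing the craft grid.
--     Each slot has 10 bits for ID, followed by 18 bits of zeros."""
--     result = 0
--
--     # Each slot is 28 bits total: 10 bits for ID + 18 bits of zeros
--     bits_per_slot = 28
--
--     # Process each slot
--     for grid_pos, item_id in enumerate(craft_grid):
--         if item_id == 0:
--             continue  # Skip empty slots
--
--         # Get the binary position for this grid position
--         binary_pos = grid_pos
--
--         # Calculate the shift amount
--         shift_amount = binary_pos * bits_per_slot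
--
--         # For each slot, we need to put the ID in the first 10 bits (from right)
--         # followed by 18 bits of zeros
--         slot_value = (item_id << 18)  # Shift ID left by 18 bits to make room for zeros
--
--         # Add this slot's contribution to the result
--         result += (slot_value << shift_amount)
--
--     return result
-- ===== SOURCE B (Python) =====
-- def generate_craft_number(craft_grid):
--     result = 0
--     for item_id in reversed(craft_grid):
--         result = (result << 28) + (item_id << 18)
--     return result
-- ===== Notes on version B (the rewrite author's own statement) =====
-- stated objective: simpler
-- what changed: Replaces per-slot absolute shifts (grid_pos*28) and the zero-skip branch with a Horner-style fold over the reversed list: result = (result << 28) + (item_id << 18) per slot.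
import Mathlib
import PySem

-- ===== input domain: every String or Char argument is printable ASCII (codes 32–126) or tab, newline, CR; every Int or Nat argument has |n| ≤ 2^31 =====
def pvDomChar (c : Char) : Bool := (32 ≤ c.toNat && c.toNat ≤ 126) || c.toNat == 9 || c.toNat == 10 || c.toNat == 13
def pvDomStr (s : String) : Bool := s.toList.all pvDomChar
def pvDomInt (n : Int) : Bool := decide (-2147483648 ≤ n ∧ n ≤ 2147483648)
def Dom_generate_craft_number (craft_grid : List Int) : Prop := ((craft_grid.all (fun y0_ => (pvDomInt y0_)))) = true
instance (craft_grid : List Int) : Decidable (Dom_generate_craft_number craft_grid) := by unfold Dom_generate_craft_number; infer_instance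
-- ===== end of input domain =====

-- B replaces A's per-slot absolute shifts and zero-skip with a Horner-style fold over the
-- reversed list (simpler decomposition; same cost).

-- ===== PORT A =====
-- Python '<<' on ints is n << k = n * 2^k (arithmetic shift, exact for negatives too).
def generate_craft_number (craft_grid : List Int) : Int :=
  (PySem.List.enumerate craft_grid).foldl
    (fun result p =>
      if p.2 = 0 then result
      else
        -- shift_amount = grid_pos * 28; slot_value = item_id << 18
        result + (p.2 * 2 ^ 18) * 2 ^ (p.1.toNat * 28))
    0

-- ===== PORT B =====
def generate_craft_number_alt (craft_grid : List Int) : Int :=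
  craft_grid.reverse.foldl (fun result item_id => result * 2 ^ 28 + item_id * 2 ^ 18) 0

-- ===== PRECONDITION & SPEC =====
def Spec_generate_craft_number (craft_grid : List Int) (out : Int) : Prop := out = generate_craft_number_alt craft_grid
instance (craft_grid : List Int) (out : Int) : Decidable (Spec_generate_craft_number craft_grid out) := by unfold Spec_generate_craft_number; infer_instance

-- ===== CLAIM (what is proved, stated in full; the proofs are below) =====
def Claim_equal_generate_craft_number : Prop := ∀ (craft_grid : List Int), Dom_generate_craft_number craft_grid → Spec_generate_craft_number craft_grid (generate_craft_number craft_grid)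

-- ===== LEMMAS AND PROOFS =====

-- canonical value: slot i contributes g[i] * 2^18 * 2^(28*i)
def pvVal : List Int → Int
  | [] => 0
  | x :: xs => x * 2 ^ 18 + 2 ^ 28 * pvVal xs

theorem pvA_from (xs : List Int) : ∀ (k : Nat) (acc : Int),
    (PySem.List.enumerate xs (k : Int)).foldl
      (fun result p =>
        if p.2 = 0 then result
        else result + (p.2 * 2 ^ 18) * 2 ^ (p.1.toNat * 28))
      acc = acc + 2 ^ (k * 28) * pvVal xs := by
  induction xs with
  | nil => intro k acc; simp [PySem.List.enumerate, pvVal]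
  | cons x xs ih =>
    intro k acc
    rw [PySem.List.enumerate_cons]
    have hk : ((k : Int) + 1) = ((k + 1 : Nat) : Int) := by push_cast; ring
    simp only [List.foldl_cons, hk, ih (k + 1)]
    have htoNat : ((k : Int)).toNat = k := Int.toNat_natCast k
    have hpow : (2 : Int) ^ ((k + 1) * 28) = 2 ^ (k * 28) * 2 ^ 28 := by
      rw [← pow_add]; ring_nf
    by_cases hx : x = 0 <;> simp [hx, pvVal, htoNat, hpow] <;> ring

theorem pvB_acc (xs : List Int) : ∀ (acc : Int),
    xs.foldl (fun result item_id => result * 2 ^ 28 + item_id * 2 ^ 18) acc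
      = acc * 2 ^ (xs.length * 28) + xs.foldl (fun result item_id => result * 2 ^ 28 + item_id * 2 ^ 18) 0 := by
  induction xs with
  | nil => intro acc; simp
  | cons x xs ih =>
    intro acc
    simp only [List.foldl_cons, List.length_cons]
    rw [ih (acc * 2 ^ 28 + x * 2 ^ 18), ih (0 * 2 ^ 28 + x * 2 ^ 18)]
    have hpow : (2 : Int) ^ ((xs.length + 1) * 28) = 2 ^ 28 * 2 ^ (xs.length * 28) := by
      rw [← pow_add]; ring_nf
    rw [hpow]; ring

theorem pvB_eq_val (xs : List Int) : generate_craft_number_alt xs = pvVal xs := by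
  induction xs with
  | nil => rfl
  | cons x xs ih =>
    unfold generate_craft_number_alt at *
    rw [List.reverse_cons, List.foldl_append, pvB_acc, ih]
    simp [pvVal]; ring

-- ===== VERDICT (by name: the statement is the Claim_ definition above) =====
theorem generate_craft_number_spec : Claim_equal_generate_craft_number := by
  intro g _
  unfold Spec_generate_craft_number
  rw [pvB_eq_val]
  have := pvA_from g 0 0
  simpa [generate_craft_number, PySem.List.enumerate] using this
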